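-- pv_equiv track=rewrite | github.com/emiliewz/leetcode | HashTable/2564.py | substringXorQueries
-- ===== SOURCE A (Python) =====
-- from collections import defaultdict
-- from typing import List
--
-- def substringXorQueries(s: str, queries: List[List[int]]) -> List[List[int]]:
--     a = defaultdict(lambda: [-1, -1])
--     n = len(s)
--     for i in range(n):
--         if s[i] == "0":
--             if 0 not in a:
--                 a[0] = [i, i]
--             continue
--         k = 0
--         for j in range(i, min(i + 30, n)):
--             k <<= 1
--             if s[j] == "1":
--                 k |= 1
--             if k not in a:
--                 a[k] = [i, j]
--
--     return [a[i ^ j] for i, j in queries]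
-- ===== SOURCE B (Python) =====
-- def _search(s, v):
--     # first (i, j) in scan order whose window value equals v, or None
--     n = len(s)
--     for i in range(n):
--         if s[i] == "0":
--             if v == 0:
--                 return [i, i]
--             continue
--         k = 0
--         for j in range(i, min(i + 30, n)):
--             k = k * 2 + (1 if s[j] == "1" else 0)
--             if k == v:
--                 return [i, j]
--             if k > v:
--                 break
--     return None
--
-- def substringXorQueries(s, queries):
--     out = []
--     for i, j in queries:
--         r = _search(s, i ^ j)
--         out.append(r if r is not None else [-1, -1])
--     return out
-- ===== Notes on version B (the rewrite author's own statement) =====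
-- stated objective: alternative
-- what changed: A precomputes a dictionary from every <=30-char window value to its first window before answering queries; B drops the index entirely and answers each query by a direct search of s that returns at the first matching window and prunes a start position as soon as the running value exceeds the query value.
import Mathlib
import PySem

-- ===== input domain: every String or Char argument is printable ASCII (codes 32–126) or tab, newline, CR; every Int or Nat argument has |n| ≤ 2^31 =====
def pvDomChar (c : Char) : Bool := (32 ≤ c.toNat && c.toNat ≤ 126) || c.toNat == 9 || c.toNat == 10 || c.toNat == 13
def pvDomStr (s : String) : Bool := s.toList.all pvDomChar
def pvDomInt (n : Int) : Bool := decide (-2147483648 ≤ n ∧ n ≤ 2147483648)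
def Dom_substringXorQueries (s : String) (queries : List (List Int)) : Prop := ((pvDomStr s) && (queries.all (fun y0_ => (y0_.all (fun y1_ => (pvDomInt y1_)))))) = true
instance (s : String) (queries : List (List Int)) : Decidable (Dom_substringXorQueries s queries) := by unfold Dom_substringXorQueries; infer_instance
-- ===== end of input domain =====

-- B replaces A's precomputed value→first-window dictionary by a direct per-query search of s
-- with early exit at the first match and pruning once the window value exceeds the query value;
-- equal return values, no side effects in either version.

-- ===== PORT A =====
-- inner loop body: k <<= 1; if s[j] == "1": k |= 1  — on 0 ≤ k this is exactly k*2 (+1);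
-- then: if k not in a: a[k] = [i, j].  State is the pair (k, a).
def xorStepJ (cs : List Char) (i : Int) (p : Int × PySem.Dict Int (List Int)) (j : Int) :
    Int × PySem.Dict Int (List Int) :=
  let k := p.1 * 2 + (if PySem.List.pyGetD cs j ' ' = '1' then 1 else 0)
  if ¬ p.2.contains k then (k, p.2.insert k [i, j]) else (k, p.2)

-- outer loop body over i in range(n); index i is always in range, so pyGetD is exact here
def xorStepI (cs : List Char) (n : Int) (a : PySem.Dict Int (List Int)) (i : Int) :
    PySem.Dict Int (List Int) :=
  if PySem.List.pyGetD cs i ' ' = '0' then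
    if ¬ a.contains 0 then a.insert 0 [i, i] else a
  else
    ((PySem.List.pyRange i (min (i + 30) n) 1).foldl (xorStepJ cs i) (0, a)).2

-- answer one query: a[i ^ j]; Python A raises ValueError unpacking a non-pair (excluded by Pre_)
def xorAnswer (a : PySem.Dict Int (List Int)) (q : List Int) : List Int :=
  match q with
  | [i, j] => a.getD (PySem.Int.bxor i j) [-1, -1]
  | _ => []

def substringXorQueries (s : String) (queries : List (List Int)) : List (List Int) :=
  let cs := s.toList
  let n : Int := PySem.Str.len s
  let a := (PySem.List.pyRange 0 n 1).foldl (xorStepI cs n) PySem.Dict.empty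
  queries.map (xorAnswer a)

-- ===== PORT B =====
-- Source B's inner loop: extend the window, return [i, j] on a hit, break once k exceeds v
def altInner (cs : List Char) (v i : Int) : List Int → Int → Option (List Int)
  | [], _ => none
  | j :: js, k =>
    let k' := k * 2 + (if PySem.List.pyGetD cs j ' ' = '1' then 1 else 0)
    if k' = v then some [i, j]
    else if v < k' then none
    else altInner cs v i js k'

-- Source B's outer loop of _search over the start positions
def altOuter (cs : List Char) (n v : Int) : List Int → Option (List Int)
  | [] => none
  | i :: is =>
    if PySem.List.pyGetD cs i ' ' = '0' then
      if v = 0 then some [i, i] else altOuter cs n v is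
    else
      match altInner cs v i (PySem.List.pyRange i (min (i + 30) n) 1) 0 with
      | some r => some r
      | none => altOuter cs n v is

-- answer one query by direct search; Python B raises ValueError unpacking a non-pair (excluded by Pre_)
def altAnswer (cs : List Char) (n : Int) (q : List Int) : List Int :=
  match q with
  | [i, j] =>
    match altOuter cs n (PySem.Int.bxor i j) (PySem.List.pyRange 0 n 1) with
    | some r => r
    | none => [-1, -1]
  | _ => []

def substringXorQueries_alt (s : String) (queries : List (List Int)) : List (List Int) :=
  let cs := s.toList
  let n : Int := PySem.Str.len s
  queries.map (altAnswer cs n)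

-- ===== PRECONDITION & SPEC =====
-- Pre_ excludes exactly the queries that are not two-element lists, on which Python A
-- (and Python B) raise ValueError while unpacking 'for i, j in queries'.
def Pre_substringXorQueries (s : String) (queries : List (List Int)) : Prop :=
  ∀ q ∈ queries, q.length = 2
instance (s : String) (queries : List (List Int)) : Decidable (Pre_substringXorQueries s queries) := by
  unfold Pre_substringXorQueries; infer_instance

def pvWitness_substringXorQueries : String × List (List Int) := ("10110", [[0, 1], [2, 3], [5, 5]])

def Spec_substringXorQueries (s : String) (queries : List (List Int)) (out : List (List Int)) : Prop := out = substringXorQueries_alt s queries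
instance (s : String) (queries : List (List Int)) (out : List (List Int)) : Decidable (Spec_substringXorQueries s queries out) := by unfold Spec_substringXorQueries; infer_instance

-- ===== CLAIM (what is proved, stated in full; the proofs are below) =====
def Claim_equal_substringXorQueries : Prop := ∀ (s : String) (queries : List (List Int)), Dom_substringXorQueries s queries → Pre_substringXorQueries s queries → Spec_substringXorQueries s queries (substringXorQueries s queries)

-- ===== LEMMAS AND PROOFS =====

-- the bit added at each inner step is 0 or 1
lemma xor_bit_cases (cs : List Char) (j : Int) :
    (if PySem.List.pyGetD cs j ' ' = '1' then (1:Int) else 0) = 1 ∨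
    (if PySem.List.pyGetD cs j ' ' = '1' then (1:Int) else 0) = 0 := by
  split <;> simp

-- A's dict only ever inserts absent keys, so an existing binding of v survives the inner loop
lemma xor_inner_preserve (cs : List Char) (i v : Int) (x : List Int) :
    ∀ (js : List Int) (k : Int) (a : PySem.Dict Int (List Int)), a.get? v = some x →
      ((js.foldl (xorStepJ cs i) (k, a)).2).get? v = some x := by
  intro js
  induction js with
  | nil => intro k a h; exact h
  | cons j js ih =>
    intro k a h
    simp only [List.foldl_cons, xorStepJ]
    generalize (if PySem.List.pyGetD cs j ' ' = '1' then (1:Int) else 0) = b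
    split
    · rename_i hcc
      apply ih
      have hne : v ≠ k * 2 + b := by
        intro he
        apply hcc
        rw [← he, PySem.Dict.contains_eq_isSome_get?, h]
        rfl
      rw [PySem.Dict.get?_insert_of_ne _ _ hne]
      exact h
    · exact ih _ a h

-- once the running value k exceeds v it only grows, so the rest of A's inner loop never adds key v
lemma xor_inner_skip (cs : List Char) (v i : Int) :
    ∀ (js : List Int) (k : Int) (a : PySem.Dict Int (List Int)), 0 ≤ k → v < k →
      ((js.foldl (xorStepJ cs i) (k, a)).2).get? v = a.get? v := by
  intro js
  induction js with
  | nil => intro k a _ _; rfl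
  | cons j js ih =>
    intro k a hk hv
    simp only [List.foldl_cons, xorStepJ]
    rcases xor_bit_cases cs j with hb | hb
    all_goals
      rw [hb]
      split
      · rw [ih _ _ (by omega) (by omega), PySem.Dict.get?_insert_of_ne _ _ (by omega)]
      · exact ih _ a (by omega) (by omega)

-- A's inner loop binds v exactly to B's inner search result (first hit), given 0 ≤ k
lemma xor_inner_main (cs : List Char) (v i : Int) :
    ∀ (js : List Int) (k : Int) (a : PySem.Dict Int (List Int)), 0 ≤ k →
      ((js.foldl (xorStepJ cs i) (k, a)).2).get? v =
        (a.get? v).or (altInner cs v i js k) := by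
  intro js
  induction js with
  | nil => intro k a _; simp [altInner]
  | cons j js ih =>
    intro k a hk
    simp only [List.foldl_cons, xorStepJ, altInner]
    have hb := xor_bit_cases cs j
    generalize hbg : (if PySem.List.pyGetD cs j ' ' = '1' then (1:Int) else 0) = b at hb ⊢
    have hb01 : b = 1 ∨ b = 0 := hb
    by_cases hkv : k * 2 + b = v
    · rw [if_pos hkv]
      by_cases hc : a.contains (k * 2 + b)
      · rw [if_neg (by simp [hc])]
        rw [hkv] at hc
        have hx : ∃ x, a.get? v = some x := by
          rw [PySem.Dict.contains_eq_isSome_get?] at hc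
          exact Option.isSome_iff_exists.mp hc
        obtain ⟨x, hx⟩ := hx
        rw [xor_inner_preserve cs i v x js _ a hx, hx, Option.some_or]
      · rw [if_pos (by simp [hc]), hkv]
        rw [hkv] at hc
        have hnone : a.get? v = none :=
          (PySem.Dict.get?_eq_none_iff_contains ..).mpr (by simpa using hc)
        rw [xor_inner_preserve cs i v [i, j] js v _ (PySem.Dict.get?_insert_self ..),
          hnone, Option.none_or]
    · rw [if_neg hkv]
      by_cases hlt : v < k * 2 + b
      · rw [if_pos hlt, Option.or_none]
        split
        · rw [xor_inner_skip cs v i js _ _ (by omega) hlt,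
            PySem.Dict.get?_insert_of_ne _ _ (by omega)]
        · exact xor_inner_skip cs v i js _ a (by omega) hlt
      · rw [if_neg hlt]
        split
        · rw [ih _ _ (by omega), PySem.Dict.get?_insert_of_ne _ _ (by omega)]
        · exact ih _ a (by omega)

-- altOuter's match is an Option.or
lemma altOuter_cons (cs : List Char) (n v i : Int) (is : List Int) :
    altOuter cs n v (i :: is) =
      if PySem.List.pyGetD cs i ' ' = '0' then
        (if v = 0 then some [i, i] else altOuter cs n v is)
      else
        (altInner cs v i (PySem.List.pyRange i (min (i + 30) n) 1) 0).or (altOuter cs n v is) := by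
  simp only [altOuter]
  split
  · rfl
  · rcases altInner cs v i (PySem.List.pyRange i (min (i + 30) n) 1) 0 with _ | r <;> rfl

-- A's whole scan binds v exactly to B's whole search result
lemma xor_outer_main (cs : List Char) (n v : Int) :
    ∀ (is : List Int) (a : PySem.Dict Int (List Int)),
      ((is.foldl (xorStepI cs n) a)).get? v = (a.get? v).or (altOuter cs n v is) := by
  intro is
  induction is with
  | nil => intro a; simp [altOuter]
  | cons i is ih =>
    intro a
    rw [List.foldl_cons, ih, altOuter_cons]
    simp only [xorStepI]
    split
    · by_cases hv : v = 0
      · subst hv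
        rw [if_pos rfl]
        by_cases hc : a.contains 0
        · rw [if_neg (by simp [hc])]
          have hx : ∃ x, a.get? (0:Int) = some x := by
            rw [PySem.Dict.contains_eq_isSome_get?] at hc
            exact Option.isSome_iff_exists.mp hc
          obtain ⟨x, hx⟩ := hx
          rw [hx, Option.some_or, Option.some_or]
        · rw [if_pos (by simp [hc])]
          have hnone : a.get? (0:Int) = none :=
            (PySem.Dict.get?_eq_none_iff_contains ..).mpr (by simpa using hc)
          rw [PySem.Dict.get?_insert_self, hnone, Option.none_or, Option.some_or]
      · rw [if_neg hv]
        split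
        · rw [PySem.Dict.get?_insert_of_ne _ _ hv]
        · rfl
    · rw [xor_inner_main cs v i _ 0 a le_rfl, Option.or_assoc]

theorem substringXorQueries_spec : Claim_equal_substringXorQueries := by
  unfold Claim_equal_substringXorQueries
  intro s queries _ hpre
  unfold Spec_substringXorQueries substringXorQueries substringXorQueries_alt
  apply List.map_congr_left
  intro q hq
  have hq2 : q.length = 2 := hpre q hq
  unfold xorAnswer altAnswer
  match q with
  | [] => simp at hq2
  | [_] => simp at hq2
  | _ :: _ :: _ :: _ => simp at hq2
  | [i, j] =>
    simp only
    rw [PySem.Dict.getD_eq_get?_getD,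
      xor_outer_main s.toList (PySem.Str.len s) (PySem.Int.bxor i j) _ PySem.Dict.empty,
      PySem.Dict.get?_empty, Option.none_or]
    rcases altOuter s.toList (PySem.Str.len s) (PySem.Int.bxor i j)
        (PySem.List.pyRange 0 (PySem.Str.len s) 1) with _ | r <;> rfl
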